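-- pv_equiv track=rewrite | github.com/narrinai/Companion-Guide | fix-all-hreflang.py | generate_hreflang_tags
-- ===== SOURCE A (Python) =====
-- def generate_hreflang_tags(urls):
--     """Generate hreflang tags from URL mapping"""
--     tags = []
--     for lang, url in sorted(urls.items()):
--         if lang == 'x-default':
--             continue
--         tags.append(f'    <link rel="alternate" hreflang="{lang}" href="{url}">')
--
--     # Add x-default last
--     if 'x-default' in urls:
--         tags.append(f'    <link rel="alternate" hreflang="x-default" href="{urls["x-default"]}">')
--
--     return '\n'.join(tags)
-- ===== SOURCE B (Python) =====
-- def generate_hreflang_tags(urls):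
--     """Generate hreflang tags from URL mapping"""
--     ordered = sorted(urls.items(), key=lambda kv: (kv[0] == 'x-default', kv[0]))
--     return '\n'.join(f'    <link rel="alternate" hreflang="{lang}" href="{url}">'
--                      for lang, url in ordered)
-- ===== Notes on version B (the rewrite author's own statement) =====
-- stated objective: simpler
-- what changed: A makes two differently-shaped passes (a sorted loop that skips x-default, then a separate membership test and dict lookup to append it); B sorts once with the composite key (lang == 'x-default', lang), which pushes x-default to the end, and builds every tag in one uniform comprehension; Pre_ excludes association lists with duplicate keys, which cannot arise from a Python dict, so no input the Python function accepts is excluded.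
import Mathlib
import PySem

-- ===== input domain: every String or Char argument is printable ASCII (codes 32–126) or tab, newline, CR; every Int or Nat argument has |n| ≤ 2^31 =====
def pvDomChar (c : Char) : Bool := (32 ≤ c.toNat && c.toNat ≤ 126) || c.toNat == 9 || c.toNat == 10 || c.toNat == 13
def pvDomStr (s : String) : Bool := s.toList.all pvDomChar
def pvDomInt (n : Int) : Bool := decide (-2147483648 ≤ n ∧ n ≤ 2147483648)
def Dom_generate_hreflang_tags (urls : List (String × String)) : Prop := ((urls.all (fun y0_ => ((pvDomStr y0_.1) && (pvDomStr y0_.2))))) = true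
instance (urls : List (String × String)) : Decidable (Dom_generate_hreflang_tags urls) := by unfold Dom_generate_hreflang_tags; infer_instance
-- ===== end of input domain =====

-- A builds the tag list in two differently-shaped passes (sorted loop skipping x-default, then a
-- separate membership test + dict lookup appending it); B sorts once with the composite key
-- (lang == 'x-default', lang) and builds all tags in one uniform map — simpler decomposition, same cost.


-- ===== PORT A =====
-- the f-string '    <link rel="alternate" hreflang="{lang}" href="{url}">' (plain concatenation)
def pvTag (lang url : String) : String :=
  PySem.Str.join "" ["    <link rel=\"alternate\" hreflang=\"", lang, "\" href=\"", url, "\">"]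

def generate_hreflang_tags (urls : List (String × String)) : String :=
  -- for lang, url in sorted(urls.items()): tuples compare lexicographically → sorted2 on (fst, snd)
  let sortedItems := PySem.List.sorted2 urls (fun p => p.1) (fun p => p.2)
  let tags := sortedItems.foldl
    (fun tags p => if p.1 == "x-default" then tags else tags ++ [pvTag p.1 p.2]) []
  let tags := if (PySem.Dict.mk urls).contains "x-default"
    then tags ++ [pvTag "x-default" ((PySem.Dict.mk urls).getD "x-default" "")]
    else tags
  PySem.Str.join "\n" tags

-- ===== PORT B =====
def generate_hreflang_tags_alt (urls : List (String × String)) : String :=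
  let ordered := PySem.List.sorted2 urls (fun p => (p.1 == "x-default" : Bool)) (fun p => p.1)
  PySem.Str.join "\n" (ordered.map (fun p => pvTag p.1 p.2))

-- ===== PRECONDITION & SPEC =====
-- Pre_ excludes association lists with duplicate first components: they cannot arise from a Python
-- dict (the argument type of the original function), so no input the Python A accepts is excluded.
def Pre_generate_hreflang_tags (urls : List (String × String)) : Prop :=
  (urls.map Prod.fst).Nodup
instance (urls : List (String × String)) : Decidable (Pre_generate_hreflang_tags urls) := by
  unfold Pre_generate_hreflang_tags; infer_instance

def pvWitness_generate_hreflang_tags : (List (String × String)) :=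
  [("en", "https://e.com/en"), ("x-default", "https://e.com/"), ("de", "https://e.com/de")]

def Spec_generate_hreflang_tags (urls : List (String × String)) (out : String) : Prop := out = generate_hreflang_tags_alt urls
instance (urls : List (String × String)) (out : String) : Decidable (Spec_generate_hreflang_tags urls out) := by unfold Spec_generate_hreflang_tags; infer_instance

-- ===== CLAIM (what is proved, stated in full; the proofs are below) =====
def Claim_equal_generate_hreflang_tags : Prop := ∀ (urls : List (String × String)), Dom_generate_hreflang_tags urls → Pre_generate_hreflang_tags urls → Spec_generate_hreflang_tags urls (generate_hreflang_tags urls)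

-- ===== LEMMAS AND PROOFS =====

-- The strict-before test sorted2 sorts with (Python's tuple-key comparison).
def pvLexB {α κ₁ κ₂ : Type} [LT κ₁] [DecidableLT κ₁] [LT κ₂] [DecidableLT κ₂]
    (k1 : α → κ₁) (k2 : α → κ₂) (a b : α) : Bool :=
  decide (k1 a < k1 b) || (!decide (k1 b < k1 a) && decide (k2 a < k2 b))

theorem pvSorted2_eq_foldl {α κ₁ κ₂ : Type} [LT κ₁] [DecidableLT κ₁] [LT κ₂] [DecidableLT κ₂]
    (xs : List α) (k1 : α → κ₁) (k2 : α → κ₂) :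
    PySem.List.sorted2 xs k1 k2 =
      xs.foldl (fun acc x => PySem.List.insertBy (pvLexB k1 k2) x acc) [] := rfl

theorem pvLexB_iff {α κ₁ κ₂ : Type} [LinearOrder κ₁] [LinearOrder κ₂]
    (k1 : α → κ₁) (k2 : α → κ₂) (a b : α) :
    pvLexB k1 k2 a b = true ↔ k1 a < k1 b ∨ (k1 a = k1 b ∧ k2 a < k2 b) := by
  simp only [pvLexB, Bool.or_eq_true, Bool.and_eq_true, Bool.not_eq_true', decide_eq_true_iff,
    decide_eq_false_iff_not, not_lt]
  constructor
  · rintro (h | ⟨h1, h2⟩)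
    · exact Or.inl h
    · rcases lt_or_eq_of_le h1 with h | h
      · exact Or.inl h
      · exact Or.inr ⟨h, h2⟩
  · rintro (h | ⟨h1, h2⟩)
    · exact Or.inl h
    · exact Or.inr ⟨le_of_eq h1, h2⟩

theorem pvLexB_trans {α κ₁ κ₂ : Type} [LinearOrder κ₁] [LinearOrder κ₂]
    (k1 : α → κ₁) (k2 : α → κ₂) (a b c : α)
    (hab : pvLexB k1 k2 a b = true) (hbc : pvLexB k1 k2 b c = true) :
    pvLexB k1 k2 a c = true := by
  rw [pvLexB_iff] at hab hbc ⊢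
  rcases hab with h | ⟨h1, h2⟩ <;> rcases hbc with h' | ⟨h1', h2'⟩
  · exact Or.inl (lt_trans h h')
  · exact Or.inl (h1' ▸ h)
  · exact Or.inl (h1 ▸ h')
  · exact Or.inr ⟨h1.trans h1', lt_trans h2 h2'⟩

theorem pvLexB_asymm {α κ₁ κ₂ : Type} [LinearOrder κ₁] [LinearOrder κ₂]
    (k1 : α → κ₁) (k2 : α → κ₂) (a b : α)
    (hab : pvLexB k1 k2 a b = true) (hba : pvLexB k1 k2 b a = true) : False := by
  rw [pvLexB_iff] at hab hba
  rcases hab with h | ⟨h1, h2⟩ <;> rcases hba with h' | ⟨h1', h2'⟩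
  · exact absurd h' (not_lt_of_gt h)
  · exact absurd h (h1' ▸ lt_irrefl _)
  · exact absurd h' (h1 ▸ lt_irrefl _)
  · exact absurd h2' (not_lt_of_gt h2)

theorem pvLexB_total {α κ₁ κ₂ : Type} [LinearOrder κ₁] [LinearOrder κ₂]
    (k1 : α → κ₁) (k2 : α → κ₂) (a b : α) (hne : a ≠ b)
    (hinj : k1 a = k1 b → k2 a = k2 b → a = b) :
    pvLexB k1 k2 a b = true ∨ pvLexB k1 k2 b a = true := by
  rcases lt_trichotomy (k1 a) (k1 b) with h | h | h
  · exact Or.inl ((pvLexB_iff _ _ _ _).2 (Or.inl h))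
  · rcases lt_trichotomy (k2 a) (k2 b) with h' | h' | h'
    · exact Or.inl ((pvLexB_iff _ _ _ _).2 (Or.inr ⟨h, h'⟩))
    · exact absurd (hinj h h') hne
    · exact Or.inr ((pvLexB_iff _ _ _ _).2 (Or.inr ⟨h.symm, h'⟩))
  · exact Or.inr ((pvLexB_iff _ _ _ _).2 (Or.inl h))

-- insertBy preserves sortedness of the accumulator (before transitive; x comparable to all of ys)
theorem pvInsertBy_pairwise {α : Type} (before : α → α → Bool)
    (htrans : ∀ a b c, before a b = true → before b c = true → before a c = true)
    (x : α) (ys : List α)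
    (htot : ∀ y ∈ ys, before x y = true ∨ before y x = true)
    (hys : ys.Pairwise (fun a b => before a b = true)) :
    (PySem.List.insertBy before x ys).Pairwise (fun a b => before a b = true) := by
  induction ys with
  | nil => simp [PySem.List.insertBy]
  | cons y t ih =>
    rw [List.pairwise_cons] at hys
    obtain ⟨hyt, ht⟩ := hys
    by_cases h : before x y = true
    · rw [show PySem.List.insertBy before x (y :: t) = x :: y :: t by
        simp [PySem.List.insertBy, h]]
      refine List.Pairwise.cons ?_ (List.Pairwise.cons hyt ht)
      intro z hz
      rcases List.mem_cons.1 hz with rfl | hz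
      · exact h
      · exact htrans _ _ _ h (hyt z hz)
    · rw [show PySem.List.insertBy before x (y :: t) = y :: PySem.List.insertBy before x t by
        simp [PySem.List.insertBy, h]]
      refine List.Pairwise.cons ?_ (ih (fun z hz => htot z (List.mem_cons_of_mem _ hz)) ht)
      intro z hz
      rcases (PySem.List.insertBy_mem_iff before x z t).1 hz with rfl | hz
      · rcases htot y (List.mem_cons_self) with h' | h'
        · exact absurd h' h
        · exact h'
      · exact hyt z hz

-- the insertion-sort fold: result is sorted and a permutation of acc ++ xs
theorem pvFoldl_insertBy_sorted {α : Type} (before : α → α → Bool)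
    (htrans : ∀ a b c, before a b = true → before b c = true → before a c = true)
    (S : List α)
    (htot : ∀ a ∈ S, ∀ b ∈ S, a ≠ b → before a b = true ∨ before b a = true) :
    ∀ (xs acc : List α), (∀ x ∈ xs, x ∈ S) → (∀ a ∈ acc, a ∈ S) →
      (acc ++ xs).Nodup → acc.Pairwise (fun a b => before a b = true) →
      (xs.foldl (fun acc x => PySem.List.insertBy before x acc) acc).Pairwise
          (fun a b => before a b = true) ∧
        (xs.foldl (fun acc x => PySem.List.insertBy before x acc) acc).Perm (acc ++ xs) := by
  intro xs
  induction xs with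
  | nil =>
    intro acc _ _ _ hacc
    simp only [List.foldl_nil, List.append_nil]
    exact ⟨hacc, List.Perm.refl acc⟩
  | cons x t ih =>
    intro acc hxs haccS hnd hacc
    have hxS : x ∈ S := hxs x List.mem_cons_self
    have hxacc : x ∉ acc := by
      rw [List.nodup_append] at hnd
      exact fun hx => hnd.2.2 x hx x List.mem_cons_self rfl
    have hperm1 : (PySem.List.insertBy before x acc).Perm (x :: acc) :=
      PySem.List.insertBy_perm before x acc
    have hpermApp : (PySem.List.insertBy before x acc ++ t).Perm (acc ++ x :: t) :=
      (hperm1.append_right t).trans List.perm_middle.symm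
    have hres := ih (PySem.List.insertBy before x acc)
      (fun z hz => hxs z (List.mem_cons_of_mem _ hz))
      (fun a ha => by
        rcases (PySem.List.insertBy_mem_iff before x a acc).1 ha with rfl | ha
        · exact hxS
        · exact haccS a ha)
      (hpermApp.nodup_iff.2 hnd)
      (pvInsertBy_pairwise before htrans x acc
        (fun y hy => htot x hxS y (haccS y hy) (fun h => hxacc (by rw [h]; exact hy)))
        hacc)
    refine ⟨hres.1, ?_⟩
    simpa using hres.2.trans hpermApp

-- sorted2 is the unique strictly-increasing rearrangement (keys jointly injective on xs)
theorem pvSorted2_eq_of_perm_of_pairwise {α κ₁ κ₂ : Type} [LinearOrder κ₁] [LinearOrder κ₂]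
    (xs ys : List α) (k1 : α → κ₁) (k2 : α → κ₂)
    (hnd : xs.Nodup)
    (hinj : ∀ a ∈ xs, ∀ b ∈ xs, k1 a = k1 b → k2 a = k2 b → a = b)
    (hperm : ys.Perm xs)
    (hpair : ys.Pairwise (fun a b => pvLexB k1 k2 a b = true)) :
    PySem.List.sorted2 xs k1 k2 = ys := by
  have htot : ∀ a ∈ xs, ∀ b ∈ xs, a ≠ b →
      pvLexB k1 k2 a b = true ∨ pvLexB k1 k2 b a = true :=
    fun a ha b hb hne => pvLexB_total k1 k2 a b hne (hinj a ha b hb)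
  obtain ⟨hp, hq⟩ := pvFoldl_insertBy_sorted (pvLexB k1 k2) (pvLexB_trans k1 k2) xs htot xs []
    (fun _ h => h) (by simp) (by simpa using hnd) List.Pairwise.nil
  have hq' : (xs.foldl (fun acc x => PySem.List.insertBy (pvLexB k1 k2) x acc) []).Perm xs := by
    simpa using hq
  rw [pvSorted2_eq_foldl]
  exact List.Perm.eq_of_pairwise
    (fun a b _ _ hab hba => (pvLexB_asymm k1 k2 a b hab hba).elim)
    hp hpair (hq'.trans hperm.symm)

-- sorted2's output is pairwise-before and a permutation of its input (same hypotheses)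
theorem pvSorted2_pairwise {α κ₁ κ₂ : Type} [LinearOrder κ₁] [LinearOrder κ₂]
    (xs : List α) (k1 : α → κ₁) (k2 : α → κ₂)
    (hnd : xs.Nodup)
    (hinj : ∀ a ∈ xs, ∀ b ∈ xs, k1 a = k1 b → k2 a = k2 b → a = b) :
    (PySem.List.sorted2 xs k1 k2).Pairwise (fun a b => pvLexB k1 k2 a b = true) := by
  have htot : ∀ a ∈ xs, ∀ b ∈ xs, a ≠ b →
      pvLexB k1 k2 a b = true ∨ pvLexB k1 k2 b a = true :=
    fun a ha b hb hne => pvLexB_total k1 k2 a b hne (hinj a ha b hb)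
  obtain ⟨hp, _⟩ := pvFoldl_insertBy_sorted (pvLexB k1 k2) (pvLexB_trans k1 k2) xs htot xs []
    (fun _ h => h) (by simp) (by simpa using hnd) List.Pairwise.nil
  rw [pvSorted2_eq_foldl]; exact hp

-- with nodup keys: the filter of urls at a key is the singleton find? / empty
theorem pvFilter_key {κ ν : Type} [BEq κ] [LawfulBEq κ] (urls : List (κ × ν)) (k : κ)
    (hnd : (urls.map Prod.fst).Nodup) :
    urls.filter (fun p => p.1 == k) =
      (match urls.find? (fun p => p.1 == k) with
       | some e => [e]
       | none => []) := by
  induction urls with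
  | nil => simp
  | cons e t ih =>
    rw [List.map_cons, List.nodup_cons] at hnd
    by_cases h : (e.1 == k) = true
    · have hk : e.1 = k := by simpa using h
      have : t.filter (fun p => p.1 == k) = [] := by
        apply List.filter_eq_nil_iff.2
        intro p hp hpk
        exact hnd.1 (by
          have : p.1 = k := by simpa using hpk
          exact (hk ▸ this ▸ List.mem_map_of_mem hp))
      simp [h, this]
    · simp [h, ih hnd.2]

theorem pvNotMem_of_contains_false {κ ν : Type} [BEq κ] [LawfulBEq κ]
    (urls : List (κ × ν)) (k : κ) (h : (PySem.Dict.mk urls).contains k = false) :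
    ∀ p ∈ urls, (p.1 == k) = false := by
  intro p hp
  by_contra hc
  have : (PySem.Dict.mk urls).contains k = true :=
    List.any_eq_true.2 ⟨p, hp, by simpa using hc⟩
  simp [this] at h

-- main equivalence
theorem pvMain (urls : List (String × String))
    (hnd : (urls.map Prod.fst).Nodup) :
    generate_hreflang_tags urls = generate_hreflang_tags_alt urls := by
  have hinjOn : ∀ a ∈ urls, ∀ b ∈ urls, a.1 = b.1 → a = b :=
    fun a ha b hb h => List.inj_on_of_nodup_map hnd ha hb h
  have hndu : urls.Nodup := List.Nodup.of_map _ hnd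
  simp only [generate_hreflang_tags, generate_hreflang_tags_alt]
  -- A's sorted list
  set sA := PySem.List.sorted2 urls (fun p : String × String => p.1) (fun p => p.2) with hsA
  have hApair : sA.Pairwise
      (fun a b => pvLexB (fun p : String × String => p.1) (fun p => p.2) a b = true) :=
    pvSorted2_pairwise urls _ _ hndu (fun a _ b _ h1 h2 => Prod.ext h1 h2)
  have hAperm : sA.Perm urls := PySem.List.sorted2_perm urls _ _ false
  -- the two filtered halves of the sorted list
  set q : String × String → Bool := fun p => !(p.1 == "x-default") with hqdef
  set nd := sA.filter q with hnddef
  set xd := sA.filter (fun p => p.1 == "x-default") with hxddef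
  have hsplit : (nd ++ xd).Perm sA := by
    have hpp := List.filter_append_perm q sA
    have hfe : sA.filter (fun x => !q x) = xd := by
      apply List.filter_congr; intro p _; simp [hqdef]
    rwa [hfe] at hpp
  have hndkey : ∀ p ∈ nd, (p.1 == "x-default") = false := by
    intro p hp
    have := List.of_mem_filter hp
    simpa [hqdef] using this
  have hxdkey : ∀ p ∈ xd, p.1 = "x-default" := by
    intro p hp
    have := List.of_mem_filter hp
    simpa using this
  have hndmem : ∀ p ∈ nd, p ∈ urls := fun p hp => hAperm.mem_iff.1 (List.mem_of_mem_filter hp)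
  have hxdmem : ∀ p ∈ xd, p ∈ urls := fun p hp => hAperm.mem_iff.1 (List.mem_of_mem_filter hp)
  -- B's sorted list is exactly nd ++ xd
  have hB : PySem.List.sorted2 urls
      (fun p : String × String => (p.1 == "x-default" : Bool)) (fun p => p.1) = nd ++ xd := by
    apply pvSorted2_eq_of_perm_of_pairwise urls (nd ++ xd) _ _ hndu
    · intro a ha b hb _ h2
      exact hinjOn a ha b hb h2
    · exact hsplit.trans hAperm
    · rw [List.pairwise_append]
      refine ⟨?_, ?_, ?_⟩
      · -- within nd: both keys non-default, fst strictly increasing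
        refine (List.Pairwise.filter q hApair).imp_of_mem ?_
        intro a b ha hb hab
        rw [pvLexB_iff] at hab ⊢
        have hne1 : a.1 ≠ b.1 := by
          intro h
          have hEq : a = b := hinjOn a (hndmem a ha) b (hndmem b hb) h
          subst hEq
          rcases hab with h' | ⟨_, h'⟩ <;> exact lt_irrefl _ h'
        have hlt : a.1 < b.1 := by
          rcases hab with h' | ⟨h', _⟩
          · exact h'
          · exact absurd h' hne1
        exact Or.inr ⟨by rw [hndkey a ha, hndkey b hb], hlt⟩
      · -- within xd: two distinct x-default entries would contradict nodup keys
        refine (List.Pairwise.filter _ hApair).imp_of_mem ?_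
        intro a b ha hb hab
        have hEq : a = b := hinjOn a (hxdmem a ha) b (hxdmem b hb)
          ((hxdkey a ha).trans (hxdkey b hb).symm)
        subst hEq
        rw [pvLexB_iff] at hab
        rcases hab with h' | ⟨_, h'⟩ <;> exact absurd h' (lt_irrefl _)
      · -- across: Bool key false < true
        intro a ha b hb
        rw [pvLexB_iff]
        left
        rw [hndkey a ha, show (b.1 == "x-default") = true by simpa using hxdkey b hb]
        decide
  -- A's skipping loop is the map over nd
  have hloop : sA.foldl
      (fun tags p => if p.1 == "x-default" then tags else tags ++ [pvTag p.1 p.2]) [] =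
      nd.map (fun p => pvTag p.1 p.2) := by
    have hcg : sA.foldl
        (fun tags p => if p.1 == "x-default" then tags else tags ++ [pvTag p.1 p.2]) [] =
        sA.foldl (fun tags p => if q p then tags ++ [pvTag p.1 p.2] else tags) [] := by
      apply PySem.List.foldl_congr_mem
      intro acc p _
      by_cases h : (p.1 == "x-default") = true <;> simp [hqdef, h]
    rw [hcg, PySem.List.foldl_append_if q (fun p => pvTag p.1 p.2) sA []]
    simp [hnddef]
  rw [hB, hloop, List.map_append]
  have hxd_urls : xd.Perm (urls.filter (fun p => p.1 == "x-default")) :=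
    List.Perm.filter _ hAperm
  by_cases hc : (PySem.Dict.mk urls).contains "x-default" = true
  · -- exactly one x-default entry e; the dict lookup returns its value
    obtain ⟨p, hp, hpk⟩ := List.any_eq_true.1 hc
    have hfind : urls.find? (fun p => p.1 == "x-default") ≠ none := by
      intro h
      rw [List.find?_eq_none] at h
      exact (h p hp) (by simpa using hpk)
    obtain ⟨e, he⟩ := Option.ne_none_iff_exists'.1 hfind
    have hek : e.1 = "x-default" := by
      have := List.find?_some he
      simpa using this
    have hxe : xd = [e] := by
      apply List.perm_singleton.1
      rw [pvFilter_key urls "x-default" hnd, he] at hxd_urls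
      exact hxd_urls
    have hget : (PySem.Dict.mk urls).getD "x-default" "" = e.2 := by
      simp [PySem.Dict.getD, PySem.Dict.get?, he]
    rw [if_pos hc, hget, hxe, List.map_singleton, hek]
  · -- no x-default entry: nothing appended, xd = []
    have hnone : ∀ p ∈ urls, (p.1 == "x-default") = false :=
      pvNotMem_of_contains_false urls _ (Bool.eq_false_iff.2 hc)
    have hxe : xd = [] := by
      have hfil : urls.filter (fun p => p.1 == "x-default") = [] :=
        List.filter_eq_nil_iff.2 (fun p hp => by simp [hnone p hp])
      rw [hfil] at hxd_urls
      exact List.Perm.eq_nil hxd_urls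
    rw [if_neg hc, hxe]
    simp

-- ===== VERDICT (by name: the statement is the Claim_ definition above) =====
theorem generate_hreflang_tags_spec : Claim_equal_generate_hreflang_tags := by
  intro urls _ hpre
  unfold Spec_generate_hreflang_tags
  exact pvMain urls hpre
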